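-- pv_equiv track=rewrite | github.com/The-devop/Cipher-Labs | crypto_core.py | pattern_alphabet
-- ===== SOURCE A (Python) =====
-- def _clean(text: str) -> str:
--     """Convert text to uppercase"""
--     return text.upper()
--
-- def pattern_alphabet(text: str) -> str:
--     """Pattern alphabet cipher"""
--     text = _clean(text)
--     pattern = {}
--     next_letter = 'A'
--     result = []
--
--     for ch in text:
--         if ch not in pattern and ch.isalpha():
--             pattern[ch] = next_letter
--             next_letter = chr(ord(next_letter) + 1)
--         result.append(pattern.get(ch, ch))
--
--     return "".join(result)
-- ===== SOURCE B (Python) =====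
-- def pattern_alphabet(text: str) -> str:
--     """Pattern alphabet cipher by closed form: each distinct letter's code is 'A'
--     offset by the number of distinct letters in the prefix strictly before its
--     first occurrence (no sequential table/counter state); non-letters pass through."""
--     up = text.upper()
--     code = {c: chr(65 + len({d for d in up[:up.index(c)] if d.isalpha()}))
--             for c in set(up) if c.isalpha()}
--     return "".join(code.get(ch, ch) for ch in up)
-- ===== Notes on version B (the rewrite author's own statement) =====
-- stated objective: alternative
-- what changed: Removed A's sequential substitution table: instead of one pass mutating a dict and a next-letter counter, B computes each distinct letter's code independently by a closed form - 65 plus the number of distinct letters in the prefix before that letter's first occurrence (a set over a slice) - over set(up), then substitutes; no order-dependent state is maintained.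
import Mathlib
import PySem

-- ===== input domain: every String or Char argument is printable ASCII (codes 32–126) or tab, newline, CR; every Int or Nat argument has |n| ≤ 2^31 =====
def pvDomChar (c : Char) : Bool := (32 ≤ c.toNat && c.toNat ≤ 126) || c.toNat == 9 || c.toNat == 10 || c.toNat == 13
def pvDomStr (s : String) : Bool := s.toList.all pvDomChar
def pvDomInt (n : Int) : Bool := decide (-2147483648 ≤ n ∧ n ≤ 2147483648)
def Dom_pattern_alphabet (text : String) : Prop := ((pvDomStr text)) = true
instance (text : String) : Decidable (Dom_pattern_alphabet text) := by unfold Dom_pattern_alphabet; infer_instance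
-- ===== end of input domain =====

-- B drops A's stateful substitution table: each letter's code is computed independently
-- by a closed form (65 + the number of distinct letters before its first occurrence);
-- alternative table-free algorithm, same result.

-- ===== PORT A =====
-- the 'for ch in text' loop of A: state (pattern, next_letter, result)
def pa_loop : List Char → PySem.Dict Char Char → Char → List Char → List Char
  | [], _pattern, _next, res => res
  | ch :: rest, pattern, next, res =>
    let st :=
      if !pattern.contains ch && PySem.Chars.isalpha ch then
        (pattern.insert ch next, Char.ofNat (next.toNat + 1))
      else (pattern, next)
    pa_loop rest st.1 st.2 (res ++ [st.1.getD ch ch])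

def pattern_alphabet (text : String) : String :=
  -- text = _clean(text) ; loop ; "".join(result)
  let t := PySem.Str.upper text
  String.ofList (pa_loop t.toList PySem.Dict.empty 'A' [])

-- ===== PORT B =====
def pattern_alphabet_alt (text : String) : String :=
  let up := (PySem.Str.upper text).toList
  -- code = {c: chr(65 + len({d for d in up[:up.index(c)] if d.isalpha()})) for c in set(up) if c.isalpha()}
  -- (a dict built by iterating set(up) — keys distinct, dict only looked up afterwards,
  -- so the result is independent of Python's set iteration order; c is drawn from up, so
  -- str.index finds its first occurrence: PySem.List.index? up c is some, .getD 0 never taken)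
  let code : PySem.Dict Char Char :=
    ⟨((PySem.Set.ofList up).filter (fun c => PySem.Chars.isalpha c)).map
      (fun c => (c, Char.ofNat (65 + (PySem.Set.ofList
        ((up.take ((PySem.List.index? up c).getD 0)).filter
          (fun d => PySem.Chars.isalpha d))).length)))⟩
  -- "".join(code.get(ch, ch) for ch in up)
  String.ofList (up.map (fun ch => code.getD ch ch))

-- ===== PRECONDITION & SPEC =====
def Spec_pattern_alphabet (text : String) (out : String) : Prop := out = pattern_alphabet_alt text
instance (text : String) (out : String) : Decidable (Spec_pattern_alphabet text out) := by unfold Spec_pattern_alphabet; infer_instance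

-- ===== CLAIM (what is proved, stated in full; the proofs are below) =====
def Claim_equal_pattern_alphabet : Prop := ∀ (text : String), Dom_pattern_alphabet text → Spec_pattern_alphabet text (pattern_alphabet text)

-- ===== LEMMAS AND PROOFS =====

-- the distinct alphabetic characters of l, in first-appearance order
def paKeys (l : List Char) : List Char :=
  PySem.List.dedup (l.filter (fun c => PySem.Chars.isalpha c))

-- A's dict {k : chr(65+i)} over enumerate keys, as a literal items list
def paDict (keys : List Char) : PySem.Dict Char Char :=
  ⟨(PySem.List.enumerate keys 0).map (fun p => (p.2, Char.ofNat (65 + p.1.toNat)))⟩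

-- what either program substitutes for ch, given the key table
def paSub (keys : List Char) (ch : Char) : Char :=
  match PySem.List.index? keys ch with
  | some k => Char.ofNat (65 + k)
  | none => ch

lemma mem_paKeys_alpha {l : List Char} {c : Char} (h : c ∈ paKeys l) :
    PySem.Chars.isalpha c = true := by
  unfold paKeys at h
  rw [PySem.List.dedup_eq_ofList, PySem.Set.mem_ofList, List.mem_filter] at h
  exact h.2

lemma mem_of_mem_paKeys {l : List Char} {c : Char} (h : c ∈ paKeys l) : c ∈ l := by
  unfold paKeys at h
  rw [PySem.List.dedup_eq_ofList, PySem.Set.mem_ofList, List.mem_filter] at h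
  exact h.1

lemma nodup_paKeys (l : List Char) : (paKeys l).Nodup := by
  unfold paKeys
  rw [PySem.List.dedup_eq_ofList]
  exact PySem.Set.nodup_ofList _

-- a Nodup list of alphabetic chars is short (alpha chars have code in [65,122])
lemma paKeys_length_le (l : List Char) : (paKeys l).length ≤ 58 := by
  have hnd := nodup_paKeys l
  have ha : ∀ c ∈ paKeys l, PySem.Chars.isalpha c = true := fun c hc => mem_paKeys_alpha hc
  set L := paKeys l with hL
  have hmap : (L.map Char.toNat).Nodup :=
    hnd.map (fun a b h => Char.ext_iff.mpr (UInt32.toNat_inj.mp h))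
  have hsub : (L.map Char.toNat).toFinset ⊆ Finset.Icc 65 122 := by
    intro x hx
    simp only [List.mem_toFinset, List.mem_map] at hx
    obtain ⟨c, hc, rfl⟩ := hx
    have h := ha c hc
    simp only [PySem.Chars.isalpha, PySem.Chars.isupper, PySem.Chars.islower,
      Bool.or_eq_true, Bool.and_eq_true, decide_eq_true_eq] at h
    simp only [Finset.mem_Icc]
    rcases h with ⟨h1, h2⟩ | ⟨h1, h2⟩ <;>
      · rw [Char.le_def] at h1 h2
        rw [UInt32.le_iff_toNat_le] at h1 h2
        exact ⟨le_trans (by decide) h1, le_trans h2 (by decide)⟩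
  calc L.length = (L.map Char.toNat).length := (List.length_map ..).symm
    _ = (L.map Char.toNat).toFinset.card := (List.toFinset_card_of_nodup hmap).symm
    _ ≤ (Finset.Icc (65:ℕ) 122).card := Finset.card_le_card hsub
    _ ≤ 58 := by simp

lemma paKeys_prefix (l t : List Char) : ∃ u, paKeys (l ++ t) = paKeys l ++ u := by
  unfold paKeys
  rw [List.filter_append, PySem.List.dedup_eq_ofList, PySem.List.dedup_eq_ofList,
    PySem.Set.ofList_append, PySem.Set.update_eq_append_filter]
  exact ⟨_, rfl⟩

lemma paKeys_append_nonalpha {ch : Char} (h : PySem.Chars.isalpha ch = false) (l : List Char) :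
    paKeys (l ++ [ch]) = paKeys l := by
  unfold paKeys
  rw [List.filter_append]
  simp [h]

lemma paKeys_append_alpha_mem {ch : Char} (l : List Char)
    (ha : PySem.Chars.isalpha ch = true) (hm : ch ∈ paKeys l) :
    paKeys (l ++ [ch]) = paKeys l := by
  unfold paKeys at *
  rw [List.filter_append]
  simp only [List.filter_cons, List.filter_nil, ha, if_pos]
  rw [PySem.List.dedup_eq_ofList, PySem.List.dedup_eq_ofList] at *
  rw [PySem.Set.ofList_append_singleton, PySem.Set.add_of_mem hm]

lemma paKeys_append_alpha_new {ch : Char} (l : List Char)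
    (ha : PySem.Chars.isalpha ch = true) (hm : ch ∉ paKeys l) :
    paKeys (l ++ [ch]) = paKeys l ++ [ch] := by
  unfold paKeys at *
  rw [List.filter_append]
  simp only [List.filter_cons, List.filter_nil, ha, if_pos]
  rw [PySem.List.dedup_eq_ofList, PySem.List.dedup_eq_ofList] at *
  rw [PySem.Set.ofList_append_singleton, PySem.Set.add_of_not_mem hm]

-- lookup in A's enumerate-built dict is index?
lemma paDict_get?_aux (keys : List Char) : ∀ (s : Nat) (ch : Char),
    (PySem.Dict.mk ((PySem.List.enumerate keys (s : Int)).map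
      (fun p => (p.2, Char.ofNat (65 + p.1.toNat)))) : PySem.Dict Char Char).get? ch
      = (PySem.List.index? keys ch).map (fun k => Char.ofNat (65 + s + k)) := by
  induction keys with
  | nil => intro s ch; simp [PySem.List.enumerate_nil, PySem.List.index?, PySem.Dict.get?]
  | cons x xs ih =>
    intro s ch
    by_cases hx : x = ch
    · subst hx
      rw [PySem.List.index?_cons_self x xs, PySem.List.enumerate_cons]
      simp [PySem.Dict.get?_mk_cons]
    · rw [PySem.List.index?_cons_of_ne xs hx, PySem.List.enumerate_cons]
      simp only [List.map_cons, PySem.Dict.get?_mk_cons]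
      rw [if_neg (by simp [hx])]
      have hcast : ((s : Int) + 1) = ((s + 1 : Nat) : Int) := by push_cast; ring
      rw [hcast, ih (s+1)]
      simp only [Option.map_map]
      congr 1
      funext k
      simp only [Function.comp_apply]
      congr 1
      omega

lemma paDict_get? (keys : List Char) (ch : Char) :
    (paDict keys).get? ch = (PySem.List.index? keys ch).map (fun k => Char.ofNat (65 + k)) := by
  have := paDict_get?_aux keys 0 ch
  simpa [paDict] using this

lemma paDict_insert_new {keys : List Char} {ch : Char} (h : ch ∉ keys) :
    (paDict keys).insert ch (Char.ofNat (65 + keys.length)) = paDict (keys ++ [ch]) := by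
  have hc : (paDict keys).contains ch = false := by
    rw [PySem.Dict.contains_eq_isSome_get?, paDict_get?]
    rw [PySem.List.index?_eq_idxOf?]
    simp [List.idxOf?_eq_none_iff.mpr h]
  apply PySem.Dict.ext
  rw [PySem.Dict.items_insert_of_not_contains _ _ hc]
  show _ = (PySem.List.enumerate (keys ++ [ch]) 0).map _
  rw [PySem.List.enumerate_append]
  simp [paDict, PySem.List.enumerate_cons]

-- (Char.ofNat n).toNat = n in the range this file uses
lemma char_toNat_ofNat {n : Nat} (h : n ≤ 123) : (Char.ofNat n).toNat = n := by
  have hv : Nat.isValidChar n := Or.inl (by omega)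
  rw [Char.ofNat, dif_pos hv]
  rfl

lemma paDict_contains (keys : List Char) (ch : Char) :
    (paDict keys).contains ch = decide (ch ∈ keys) := by
  rw [PySem.Dict.contains_eq_isSome_get?, paDict_get?, PySem.List.index?_eq_idxOf?]
  by_cases h : ch ∈ keys
  · simp only [h, decide_true]
    rw [Option.isSome_map]
    exact Option.isSome_iff_ne_none.mpr (fun hn => (List.idxOf?_eq_none_iff.mp hn) h)
  · simp [List.idxOf?_eq_none_iff.mpr h, h]

lemma index?_none_of_not_mem {l : List Char} {ch : Char} (h : ch ∉ l) :
    PySem.List.index? l ch = none := by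
  rw [PySem.List.index?_eq_idxOf?]
  exact List.idxOf?_eq_none_iff.mpr h

lemma index?_some_of_mem {l : List Char} {ch : Char} (h : ch ∈ l) :
    ∃ k, PySem.List.index? l ch = some k := by
  rw [PySem.List.index?_eq_idxOf?]
  exact Option.isSome_iff_exists.mp
    (Option.isSome_iff_ne_none.mpr (fun hn => (List.idxOf?_eq_none_iff.mp hn) h))

-- main loop invariant for A: processing rest with the table of done gives the full-table map
lemma pa_loop_spec (rest : List Char) : ∀ (done res : List Char),
    pa_loop rest (paDict (paKeys done)) (Char.ofNat (65 + (paKeys done).length)) res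
      = res ++ rest.map (paSub (paKeys (done ++ rest))) := by
  induction rest with
  | nil => intro done res; simp [pa_loop]
  | cons ch rest ih =>
    intro done res
    by_cases ha : PySem.Chars.isalpha ch = true
    · by_cases hm : ch ∈ paKeys done
      · -- an already-seen letter: no insert, substitute its table value
        have hc : (paDict (paKeys done)).contains ch = true := by
          rw [paDict_contains]; simp [hm]
        obtain ⟨k, hk⟩ := index?_some_of_mem hm
        have hg : (paDict (paKeys done)).getD ch ch = Char.ofNat (65 + k) := by
          rw [PySem.Dict.getD_eq_get?_getD, paDict_get?, hk]; rfl
        have hK : paKeys (done ++ [ch]) = paKeys done := paKeys_append_alpha_mem done ha hm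
        obtain ⟨u, hu⟩ := paKeys_prefix (done ++ [ch]) rest
        simp only [List.append_assoc, List.singleton_append] at hu
        have hsub : paSub (paKeys (done ++ ch :: rest)) ch = Char.ofNat (65 + k) := by
          unfold paSub
          rw [hu, hK, PySem.List.index?_append_of_mem u hm, hk]
        simp only [pa_loop, hc, Bool.not_true, Bool.false_and, Bool.false_eq_true, if_false, hg]
        have h2 := ih (done ++ [ch]) (res ++ [Char.ofNat (65 + k)])
        rw [hK] at h2
        simp only [List.append_assoc, List.singleton_append] at h2
        rw [h2, List.map_cons, hsub]
      · -- a new letter: insert it and emit the fresh letter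
        have hc : (paDict (paKeys done)).contains ch = false := by
          rw [paDict_contains]; simp [hm]
        have hlen := paKeys_length_le done
        have htn : (Char.ofNat (65 + (paKeys done).length)).toNat
            = 65 + (paKeys done).length := char_toNat_ofNat (by omega)
        have hK : paKeys (done ++ [ch]) = paKeys done ++ [ch] :=
          paKeys_append_alpha_new done ha hm
        have hins := paDict_insert_new hm
        have hg : (paDict (paKeys done ++ [ch])).getD ch ch
            = Char.ofNat (65 + (paKeys done).length) := by
          rw [PySem.Dict.getD_eq_get?_getD, paDict_get?,
            PySem.List.index?_append_singleton_self _ _ hm]; rfl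
        obtain ⟨u, hu⟩ := paKeys_prefix (done ++ [ch]) rest
        simp only [List.append_assoc, List.singleton_append] at hu
        have hsub : paSub (paKeys (done ++ ch :: rest)) ch
            = Char.ofNat (65 + (paKeys done).length) := by
          unfold paSub
          rw [hu, hK, PySem.List.index?_append_of_mem u (by simp),
            PySem.List.index?_append_singleton_self _ _ hm]
        simp only [pa_loop, hc, Bool.not_false, ha, Bool.and_self, if_true, htn, hins]
        have h2 := ih (done ++ [ch]) (res ++ [(paDict (paKeys done ++ [ch])).getD ch ch])
        rw [hK] at h2
        simp only [List.append_assoc, List.singleton_append] at h2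
        have hlen2 : Char.ofNat (65 + (paKeys done).length + 1)
            = Char.ofNat (65 + (paKeys done ++ [ch]).length) := by
          congr 1
          simp
          omega
        rw [hlen2, h2, List.map_cons, hsub, hg]
    · -- not a letter: passed through unchanged
      have ha' : PySem.Chars.isalpha ch = false := by simpa using ha
      have hnot : ch ∉ paKeys done := fun hmem => by simp [mem_paKeys_alpha hmem] at ha'
      have hg : (paDict (paKeys done)).getD ch ch = ch := by
        rw [PySem.Dict.getD_eq_get?_getD, paDict_get?, index?_none_of_not_mem hnot]; rfl
      have hK : paKeys (done ++ [ch]) = paKeys done := paKeys_append_nonalpha ha' done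
      have hsub : paSub (paKeys (done ++ ch :: rest)) ch = ch := by
        have hn : ch ∉ paKeys (done ++ ch :: rest) := fun hmem => by
          simp [mem_paKeys_alpha hmem] at ha'
        unfold paSub
        rw [index?_none_of_not_mem hn]
      simp only [pa_loop, ha', Bool.and_false, Bool.false_eq_true, if_false, hg]
      have h2 := ih (done ++ [ch]) (res ++ [ch])
      rw [hK] at h2
      simp only [List.append_assoc, List.singleton_append] at h2
      rw [h2, List.map_cons, hsub]

-- B's closed form agrees with the table substitution, character by character
lemma alt_char_eq (up : List Char) (ch : Char) (hmem : ch ∈ up) :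
    (if PySem.Chars.isalpha ch then
      Char.ofNat (65 + (PySem.Set.ofList
        ((up.take ((PySem.List.index? up ch).getD 0)).filter
          (fun c => PySem.Chars.isalpha c))).length)
    else ch) = paSub (paKeys up) ch := by
  by_cases ha : PySem.Chars.isalpha ch = true
  · obtain ⟨i, hi⟩ := index?_some_of_mem hmem
    obtain ⟨pre, suf, hsplit, hlen, hpre⟩ := (PySem.List.index?_eq_some_iff ..).mp hi
    have htake : up.take ((PySem.List.index? up ch).getD 0) = pre := by
      rw [hi, Option.getD_some, ← hlen, hsplit, List.take_left]
    have hnotk : ch ∉ paKeys pre := fun h => hpre (mem_of_mem_paKeys h)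
    obtain ⟨u, hu⟩ := paKeys_prefix (pre ++ [ch]) suf
    simp only [List.append_assoc, List.singleton_append] at hu
    have hidx : PySem.List.index? (paKeys up) ch = some (paKeys pre).length := by
      rw [hsplit, hu, paKeys_append_alpha_new pre ha hnotk,
        PySem.List.index?_append_of_mem u (by simp),
        PySem.List.index?_append_singleton_self _ _ hnotk]
    rw [if_pos ha]
    unfold paSub
    rw [hidx, htake]
    simp only [paKeys, PySem.List.dedup_eq_ofList]
  · have ha' : PySem.Chars.isalpha ch = false := by simpa using ha
    have hn : ch ∉ paKeys up := fun hmem' => by simp [mem_paKeys_alpha hmem'] at ha'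
    rw [if_neg (by simp [ha'])]
    unfold paSub
    rw [index?_none_of_not_mem hn]

-- lookup in a dict whose items are (c, f c) over a list of distinct keys
lemma get?_mapped (l : List Char) (f : Char → Char) (ch : Char) :
    (PySem.Dict.mk (l.map (fun c => (c, f c))) : PySem.Dict Char Char).get? ch
      = if ch ∈ l then some (f ch) else none := by
  induction l with
  | nil => simp [PySem.Dict.get?]
  | cons x xs ih =>
    simp only [List.map_cons, PySem.Dict.get?_mk_cons]
    by_cases hx : x = ch
    · subst hx; simp
    · rw [if_neg (by simp [hx]), ih]
      by_cases h : ch ∈ xs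
      · rw [if_pos h, if_pos (List.mem_cons_of_mem x h)]
      · rw [if_neg h, if_neg (by simp [h, Ne.symm hx])]

-- B's port computes the same map as the table substitution over the whole text
lemma alt_eq (text : String) :
    pattern_alphabet_alt text
      = String.ofList (((PySem.Str.upper text).toList).map
          (paSub (paKeys (PySem.Str.upper text).toList))) := by
  simp only [pattern_alphabet_alt]
  refine congrArg String.ofList (List.map_congr_left ?_)
  intro ch hch
  rw [PySem.Dict.getD_eq_get?_getD, get?_mapped, ← alt_char_eq _ ch hch]
  by_cases ha : PySem.Chars.isalpha ch = true
  · rw [if_pos (by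
        simp only [List.mem_filter, PySem.Set.mem_ofList, ha, and_true]
        simpa using hch), if_pos ha]
    rw [Option.getD_some]
  · have hn : ch ∉ ((PySem.Set.ofList ((PySem.Str.upper text).toList)).filter
        (fun c => PySem.Chars.isalpha c)) := fun h => ha (List.mem_filter.mp h).2
    rw [if_neg hn, if_neg ha]
    rw [Option.getD_none]

-- ===== VERDICT (by name: the statement is the Claim_ definition above) =====
theorem pattern_alphabet_spec : Claim_equal_pattern_alphabet := by
  intro text _
  unfold Spec_pattern_alphabet pattern_alphabet
  rw [alt_eq]
  have h := pa_loop_spec ((PySem.Str.upper text).toList) [] []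
  rw [show paKeys ([] : List Char) = [] from rfl] at h
  rw [show paDict ([] : List Char) = PySem.Dict.empty from rfl] at h
  rw [show Char.ofNat (65 + ([] : List Char).length) = 'A' from by decide] at h
  rw [List.nil_append, List.nil_append] at h
  simp only []
  rw [h]
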